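-- pv_equiv track=rewrite | github.com/enderdzz/ReverseThings | flareon6/7 - wopr/_wopr.exe.extracted/b/c/e/PYC50.pyc.py | long_has_args
-- ===== SOURCE A (Python) =====
-- class GetoptError(Exception):
--     opt = ''
--     msg = ''
--
--     def __init__(self, msg, opt=''):
--         self.msg = msg
--         self.opt = opt
--         Exception.__init__(self, msg, opt)
--
--     def __str__(self):
--         return self.msg
--
-- def long_has_args(opt, longopts):
--     possibilities = [o for o in longopts if o.startswith(opt)]
--     if not possibilities:
--         raise GetoptError(_('option --%s not recognized') % opt, opt)
--     if opt in possibilities: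
--         return (
--          False, opt)
--     elif opt + '=' in possibilities:
--         return (True, opt)
--     else:
--         if len(possibilities) > 1:
--             raise GetoptError(_('option --%s not a unique prefix') % opt, opt)
--         if not len(possibilities) == 1:
--             raise AssertionError
--         unique_match = possibilities[0]
--         has_arg = unique_match.endswith('=')
--         if has_arg:
--             unique_match = unique_match[:-1]
--         return (has_arg, unique_match)
-- ===== SOURCE B (Python) =====
-- class GetoptError(Exception):
--     opt = ''
--     msg = ''
--
--     def __init__(self, msg, opt=''):
--         self.msg = msg
--         self.opt = opt
--         Exception.__init__(self, msg, opt)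
--
--     def __str__(self):
--         return self.msg
--
-- def _unique_prefix(opt, rest, found):
--     # Recursive search for the single prefix match; raises eagerly on a
--     # second match, raises 'not recognized' at the end if none was seen.
--     if not rest:
--         if found is None:
--             raise GetoptError('option --%s not recognized' % opt, opt)
--         if found.endswith('='):
--             return (True, found[:-1])
--         return (False, found)
--     head = rest[0]
--     if head.startswith(opt):
--         if found is not None:
--             raise GetoptError('option --%s not a unique prefix' % opt, opt)
--         return _unique_prefix(opt, rest[1:], head)
--     return _unique_prefix(opt, rest[1:], found)
--
-- def long_has_args(opt, longopts):
--     # Staged decomposition: short-circuit the two exact cases directly on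
--     # longopts (no filtered possibilities list), then resolve the unique
--     # prefix by structural recursion with eager ambiguity detection.
--     if opt in longopts:
--         return (False, opt)
--     if opt + '=' in longopts:
--         return (True, opt)
--     return _unique_prefix(opt, longopts, None)
-- ===== Notes on version B (the rewrite author's own statement) =====
-- stated objective: alternative
-- what changed: Instead of building a filtered possibilities list and scanning it several times, B short-circuits the exact opt and opt+'=' cases by direct membership in longopts and then resolves the unique prefix by a structural recursion that carries at most one candidate and raises eagerly on a second prefix match.
import Mathlib
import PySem

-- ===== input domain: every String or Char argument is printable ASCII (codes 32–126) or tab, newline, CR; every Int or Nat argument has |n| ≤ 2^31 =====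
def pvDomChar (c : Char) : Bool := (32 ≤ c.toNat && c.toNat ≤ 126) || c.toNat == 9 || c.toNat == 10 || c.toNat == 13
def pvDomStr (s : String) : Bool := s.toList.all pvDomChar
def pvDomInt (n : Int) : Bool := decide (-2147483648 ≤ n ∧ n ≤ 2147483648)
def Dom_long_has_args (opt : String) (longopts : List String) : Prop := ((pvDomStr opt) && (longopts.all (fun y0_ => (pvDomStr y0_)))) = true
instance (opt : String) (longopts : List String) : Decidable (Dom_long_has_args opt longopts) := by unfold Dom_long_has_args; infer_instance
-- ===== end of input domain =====

-- B drops A's filtered possibilities list: it short-circuits the exact opt / opt+'=' cases by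
-- direct membership in longopts and resolves the unique prefix by a structural recursion that
-- carries at most one candidate; on inputs where the Python raises (no prefix match / ambiguous
-- prefix, excluded by Pre_) both ports return (false, "").

-- ===== PORT A =====
def long_has_args (opt : String) (longopts : List String) : Bool × String :=
  let possibilities := longopts.filter (fun o => PySem.Str.startswith o opt)
  if possibilities = [] then
    (false, "")  -- raise GetoptError('option --%s not recognized') : excluded by Pre_
  else if possibilities.contains opt then
    (false, opt)
  else if possibilities.contains (opt ++ "=") then
    (true, opt)
  else if 1 < possibilities.length then
    (false, "")  -- raise GetoptError('option --%s not a unique prefix') : excluded by Pre_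
  else if possibilities.length ≠ 1 then
    (false, "")  -- raise AssertionError (unreachable)
  else
    let unique_match := possibilities.headD ""
    let has_arg := PySem.Str.endswith unique_match "="
    if has_arg then (has_arg, PySem.Str.slice unique_match none (some (-1)))
    else (has_arg, unique_match)

-- ===== PORT B =====
-- recursive helper _unique_prefix of Source B; found : Option String
def lhaUnique (opt : String) (rest : List String) (found : Option String) : Bool × String :=
  match rest with
  | [] =>
    match found with
    | none => (false, "")  -- raise: option not recognized (excluded by Pre_)
    | some m =>
      if PySem.Str.endswith m "=" then (true, PySem.Str.slice m none (some (-1)))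
      else (false, m)
  | head :: t =>
    if PySem.Str.startswith head opt then
      match found with
      | some _ => (false, "")  -- raise: not a unique prefix (excluded by Pre_)
      | none => lhaUnique opt t (some head)
    else lhaUnique opt t found

def long_has_args_alt (opt : String) (longopts : List String) : Bool × String :=
  if longopts.contains opt then (false, opt)
  else if longopts.contains (opt ++ "=") then (true, opt)
  else lhaUnique opt longopts none

-- ===== PRECONDITION & SPEC =====
-- Pre_ excludes exactly the inputs where the Python raises: no element of longopts starts
-- with opt, or the prefix is ambiguous (several matches, none equal to opt or opt+'=').
def Pre_long_has_args (opt : String) (longopts : List String) : Prop :=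
  let ms := longopts.filter (fun o => PySem.Str.startswith o opt)
  ms ≠ [] ∧ (opt ∈ ms ∨ (opt ++ "=") ∈ ms ∨ ms.length = 1)
instance (opt : String) (longopts : List String) : Decidable (Pre_long_has_args opt longopts) := by
  unfold Pre_long_has_args; infer_instance

def pvWitness_long_has_args : String × List String := ("he", ["help", "verbose"])

def Spec_long_has_args (opt : String) (longopts : List String) (out : Bool × String) : Prop := out = long_has_args_alt opt longopts
instance (opt : String) (longopts : List String) (out : Bool × String) : Decidable (Spec_long_has_args opt longopts out) := by unfold Spec_long_has_args; infer_instance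

-- ===== CLAIM (what is proved, stated in full; the proofs are below) =====
def Claim_equal_long_has_args : Prop := ∀ (opt : String) (longopts : List String), Dom_long_has_args opt longopts → Pre_long_has_args opt longopts → Spec_long_has_args opt longopts (long_has_args opt longopts)

-- ===== LEMMAS AND PROOFS =====

-- once a candidate is held and no further element matches, the recursion finishes on it
theorem lhaUnique_some (opt : String) (l : List String) (x : String)
    (h : l.filter (fun o => PySem.Str.startswith o opt) = []) :
    lhaUnique opt l (some x) =
      (if PySem.Str.endswith x "=" then (true, PySem.Str.slice x none (some (-1)))
       else (false, x)) := by
  induction l with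
  | nil => rfl
  | cons o t ih =>
    rw [List.filter_cons] at h
    by_cases hs : PySem.Str.startswith o opt = true
    · rw [if_pos hs] at h; simp at h
    · rw [if_neg (by simpa using hs)] at h
      simp only [lhaUnique]
      rw [if_neg (by simpa [PySem.Str.startswith] using hs)]
      exact ih h

-- with exactly one prefix match, the search from 'none' finds it
theorem lhaUnique_none (opt : String) (l : List String) (x : String)
    (h : l.filter (fun o => PySem.Str.startswith o opt) = [x]) :
    lhaUnique opt l none =
      (if PySem.Str.endswith x "=" then (true, PySem.Str.slice x none (some (-1)))
       else (false, x)) := by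
  induction l with
  | nil => simp at h
  | cons o t ih =>
    rw [List.filter_cons] at h
    by_cases hs : PySem.Str.startswith o opt = true
    · rw [if_pos hs] at h
      obtain ⟨rfl, ht⟩ : o = x ∧ t.filter (fun o => PySem.Str.startswith o opt) = [] := by
        constructor <;> [exact (List.cons_eq_cons.mp h).1; exact (List.cons_eq_cons.mp h).2]
      simp only [lhaUnique]
      rw [if_pos (by simpa [PySem.Str.startswith] using hs)]
      exact lhaUnique_some opt t o ht
    · rw [if_neg (by simpa using hs)] at h
      simp only [lhaUnique]
      rw [if_neg (by simpa [PySem.Str.startswith] using hs)]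
      exact ih h

-- ===== VERDICT (by name: the statement is the Claim_ definition above) =====
theorem long_has_args_spec : Claim_equal_long_has_args := by
  intro opt longopts _hdom hpre
  unfold Spec_long_has_args long_has_args long_has_args_alt
  obtain ⟨hnil, hcase⟩ := hpre
  have hopt : PySem.Str.startswith opt opt = true := by
    simp [PySem.Str.startswith, PySem.Chars.startswith_iff]
  have hoq : PySem.Str.startswith (opt ++ "=") opt = true := by
    simp [PySem.Str.startswith, PySem.Chars.startswith_iff]
  simp only []
  by_cases hmem : opt ∈ longopts
  · have hA : opt ∈ longopts.filter (fun o => PySem.Str.startswith o opt) :=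
      List.mem_filter.mpr ⟨hmem, hopt⟩
    rw [if_neg hnil,
        if_pos (show (longopts.filter (fun o => PySem.Str.startswith o opt)).contains opt = true
          by simpa using hA),
        if_pos (show longopts.contains opt = true by simpa using hmem)]
  · by_cases hmeq : (opt ++ "=") ∈ longopts
    · have hA : (opt ++ "=") ∈ longopts.filter (fun o => PySem.Str.startswith o opt) :=
        List.mem_filter.mpr ⟨hmeq, hoq⟩
      rw [if_neg hnil,
          if_neg (show ¬ (longopts.filter (fun o => PySem.Str.startswith o opt)).contains opt = true by
            intro hc
            exact hmem (List.mem_filter.mp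
              (show opt ∈ longopts.filter (fun o => PySem.Str.startswith o opt) by
                simpa using hc)).1),
          if_pos (show (longopts.filter
              (fun o => PySem.Str.startswith o opt)).contains (opt ++ "=") = true
            by simpa using hA),
          if_neg (show ¬ longopts.contains opt = true by simpa using hmem),
          if_pos (show longopts.contains (opt ++ "=") = true by simpa using hmeq)]
    · have h1 : (longopts.filter (fun o => PySem.Str.startswith o opt)).length = 1 := by
        rcases hcase with h | h | h
        · exact absurd (List.mem_filter.mp h).1 hmem
        · exact absurd (List.mem_filter.mp h).1 hmeq
        · exact h
      obtain ⟨x, hx⟩ := List.length_eq_one_iff.mp h1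
      have hxo : x ≠ opt := fun h => hmem
        ((List.mem_filter.mp (hx ▸ List.mem_singleton_self x)).1 |> (h ▸ ·))
      have hxq : x ≠ opt ++ "=" := fun h => hmeq
        ((List.mem_filter.mp (hx ▸ List.mem_singleton_self x)).1 |> (h ▸ ·))
      rw [hx, if_neg (show ¬ ([x] = []) by simp),
          if_neg (show ¬ ([x].contains opt = true) by simp [Ne.symm hxo]),
          if_neg (show ¬ ([x].contains (opt ++ "=") = true) by simp [Ne.symm hxq]),
          if_neg (show ¬ (1 < [x].length) by simp),
          if_neg (show ¬ ([x].length ≠ 1) by simp),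
          if_neg (show ¬ ((longopts.contains opt) = true) by simpa using hmem),
          if_neg (show ¬ ((longopts.contains (opt ++ "=")) = true) by simpa using hmeq),
          lhaUnique_none opt longopts x hx]
      rcases Bool.eq_false_or_eq_true (PySem.Chars.endswith x.toList ['=']) with he | he <;>
        simp [PySem.Str.endswith, he]
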